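-- pv_equiv track=rewrite | github.com/nix6839/algorithm-solving | 이취코 with 파이썬/a_greedy/part3/c_reverse_string.py | c_reverse_string
-- ===== SOURCE A (Python) =====
-- def c_reverse_string(binary_str: str) -> int:
--     zero_count = 0
--     one_count = 0
--     prev_binary_char = None
--
--     for binary_char in binary_str:
--         if binary_char == '0' and prev_binary_char != '0':
--             zero_count += 1
--         elif binary_char == '1' and prev_binary_char != '1':
--             one_count += 1
--         prev_binary_char = binary_char
--
--     return min(zero_count, one_count)
-- ===== SOURCE B (Python) =====
-- def c_reverse_string(binary_str: str) -> int:
--     def runs(ch):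
--         return len(''.join(c if c == ch else ' ' for c in binary_str).split())
--     return min(runs('0'), runs('1'))
-- ===== Notes on version B (the rewrite author's own statement) =====
-- stated objective: alternative
-- what changed: B replaces A's single stateful scan with two prev-tracking counters by a staged pipeline: for each digit it masks every other character to a space and lets str.split() find the maximal runs, returning the min of the two run counts.
import Mathlib
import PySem

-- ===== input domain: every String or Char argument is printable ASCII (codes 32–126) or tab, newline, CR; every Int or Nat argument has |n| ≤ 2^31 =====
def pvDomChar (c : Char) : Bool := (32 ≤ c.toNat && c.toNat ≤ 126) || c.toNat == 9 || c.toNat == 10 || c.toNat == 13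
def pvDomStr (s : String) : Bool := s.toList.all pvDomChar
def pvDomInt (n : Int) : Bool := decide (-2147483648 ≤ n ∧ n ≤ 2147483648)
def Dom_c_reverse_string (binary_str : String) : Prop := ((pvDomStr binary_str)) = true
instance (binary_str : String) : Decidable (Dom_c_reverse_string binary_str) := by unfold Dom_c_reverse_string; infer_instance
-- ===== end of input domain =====

-- ===== PORT A =====
-- B does run detection via mask + str.split() instead of A's stateful prev-comparison scan;
-- objective: alternative decomposition, same O(n) cost.
-- one loop step of A: state (zero_count, one_count, prev_binary_char)
def aStep (st : Int × Int × Option Char) (binary_char : Char) : Int × Int × Option Char :=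
  if binary_char = '0' ∧ st.2.2 ≠ some '0' then (st.1 + 1, st.2.1, some binary_char)
  else if binary_char = '1' ∧ st.2.2 ≠ some '1' then (st.1, st.2.1 + 1, some binary_char)
  else (st.1, st.2.1, some binary_char)

def c_reverse_string (binary_str : String) : Int :=
  let st := binary_str.toList.foldl aStep (0, 0, none)
  min st.1 st.2.1

-- ===== PORT B =====
-- runs(ch) = len(''.join(c if c == ch else ' ' for c in binary_str).split())
def bRuns (binary_str : String) (ch : Char) : Int :=
  ((PySem.Str.split₀ (String.ofList
      (binary_str.toList.map (fun c => if c = ch then c else ' ')))).length : Int)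

def c_reverse_string_alt (binary_str : String) : Int :=
  min (bRuns binary_str '0') (bRuns binary_str '1')

-- ===== PRECONDITION & SPEC =====
def Spec_c_reverse_string (binary_str : String) (out : Int) : Prop := out = c_reverse_string_alt binary_str
instance (binary_str : String) (out : Int) : Decidable (Spec_c_reverse_string binary_str out) := by unfold Spec_c_reverse_string; infer_instance

-- ===== CLAIM (what is proved, stated in full; the proofs are below) =====
def Claim_equal_c_reverse_string : Prop := ∀ (binary_str : String), Dom_c_reverse_string binary_str → Spec_c_reverse_string binary_str (c_reverse_string binary_str)

-- ===== LEMMAS AND PROOFS =====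
-- number of maximal runs of ch in l, given whether the previous char was ch
def runCount (ch : Char) : Bool → List Char → Nat
  | _, [] => 0
  | b, c :: l => if c = ch then (if b then 0 else 1) + runCount ch true l else runCount ch false l

lemma fold_runs (l : List Char) (p : Option Char) (z o : Int) :
    (l.foldl aStep (z, o, p)).1 = z + (runCount '0' (p = some '0') l : Int) ∧
    (l.foldl aStep (z, o, p)).2.1 = o + (runCount '1' (p = some '1') l : Int) := by
  induction l generalizing p z o with
  | nil => simp [runCount]
  | cons c l ih =>
    simp only [List.foldl_cons, aStep, runCount]
    by_cases h0 : c = '0' ∧ p ≠ some '0'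
    · obtain ⟨hc, hp⟩ := h0
      subst hc
      have h := ih (some '0') (z + 1) o
      refine ⟨?_, ?_⟩ <;> simp [hp, h.1, h.2] <;> ring
    · by_cases h1 : c = '1' ∧ p ≠ some '1'
      · obtain ⟨hc, hp⟩ := h1
        subst hc
        have h := ih (some '1') z (o + 1)
        refine ⟨?_, ?_⟩ <;> simp [h0, hp, h.1, h.2] <;> ring
      · have h := ih (some c) z o
        by_cases hc0 : c = '0'
        · subst hc0
          have hp : p = some '0' := by
            by_contra hp; exact h0 ⟨rfl, hp⟩
          refine ⟨?_, ?_⟩ <;> simp [hp, h.1, h.2]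
        · by_cases hc1 : c = '1'
          · subst hc1
            have hp : p = some '1' := by
              by_contra hp; exact h1 ⟨rfl, hp⟩
            refine ⟨?_, ?_⟩ <;> simp [hp, h.1, h.2, hc0]
          · refine ⟨?_, ?_⟩ <;>
              simp [h0, h1, h.1, h.2, hc0, hc1, Option.some_inj]

lemma go_length (ch : Char) (hch : PySem.Chars.isspace ch = false) (l : List Char)
    (cur : List Char) (acc : List (List Char)) (b : Bool) (hb : (cur.isEmpty = false) ↔ b = true) :
    (PySem.Chars.split₀.go (l.map (fun c => if c = ch then c else ' ')) cur acc).length =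
      acc.length + (if b then 1 else 0) + runCount ch b l := by
  induction l generalizing cur acc b with
  | nil =>
    simp only [List.map_nil, PySem.Chars.split₀.go, runCount]
    cases b with
    | true =>
      have : cur.isEmpty = false := hb.mpr rfl
      simp [this]
    | false =>
      have : ¬ cur.isEmpty = false := fun h => by simpa using hb.mp h
      simp at this
      simp [this]
  | cons c l ih =>
    simp only [List.map_cons, PySem.Chars.split₀.go]
    by_cases hc : c = ch
    · subst hc
      rw [if_pos rfl, if_neg (by simp [hch])]
      have := ih (c :: cur) acc true (by simp)
      rw [this]
      cases b with
      | true =>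
        have hne : cur.isEmpty = false := hb.mpr rfl
        simp [runCount, hne]
      | false =>
        simp [runCount]
        omega
    · rw [if_neg hc, if_pos (by decide : PySem.Chars.isspace ' ' = true)]
      cases b with
      | true =>
        have hne : cur.isEmpty = false := hb.mpr rfl
        rw [if_neg (by simp [hne])]
        have := ih [] (cur.reverse :: acc) false (by simp)
        rw [this]
        simp [runCount, hc]
      | false =>
        have : ¬ cur.isEmpty = false := fun h => by simpa using hb.mp h
        simp at this
        rw [if_pos (by simp [this])]
        have := ih [] acc false (by simp)
        rw [this]
        simp [runCount, hc]

lemma bRuns_eq (s : String) (ch : Char) (hch : PySem.Chars.isspace ch = false) :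
    bRuns s ch = (runCount ch false s.toList : Int) := by
  have h := go_length ch hch s.toList [] [] false (by simp)
  simp only [bRuns, PySem.Str.split₀, List.length_map, PySem.Chars.split₀]
  simp only [String.toList_ofList]
  rw [h]
  simp

-- ===== VERDICT (by name: the statement is the Claim_ definition above) =====
theorem c_reverse_string_spec : Claim_equal_c_reverse_string := by
  intro s _
  have h := fold_runs s.toList none 0 0
  simp only [Spec_c_reverse_string, c_reverse_string, c_reverse_string_alt]
  rw [bRuns_eq s '0' (by decide), bRuns_eq s '1' (by decide)]
  simp only [h.1, h.2]
  simp
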